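-- pv_equiv track=rewrite | github.com/edaaydinea/HackerRank | Algorithms/03 - Strings/String Function Calculation.py | toIntKeysBest
-- ===== SOURCE A (Python) =====
-- def toIntKeysBest(l):
--     seen = set()
--     ls = []
--     for e in l:
--         if e not in seen:
--             ls.append(e)
--             seen.add(e)
--     ls.sort()
--     index = {v: i for i, v in enumerate(ls)}
--     return [index[v] for v in l]
-- ===== SOURCE B (Python) =====
-- def toIntKeysBest(l):
--     # sorted distinct values once, then a hand-written bisect_left per element:
--     # the rank of v is the number of distinct values smaller than v.
--     sl = sorted(set(l))
--     out = []
--     for v in l: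
--         lo, hi = 0, len(sl)
--         while lo < hi:
--             mid = (lo + hi) // 2
--             if sl[mid] < v:
--                 lo = mid + 1
--             else:
--                 hi = mid
--         out.append(lo)
--     return out
-- ===== Notes on version B (the rewrite author's own statement) =====
-- stated objective: alternative
-- what changed: Replaces A's insertion-order dedup list + sort + enumerate-built lookup dict with sorting the distinct values once and binary-searching (hand-written bisect_left) each element's rank in that sorted list.
import Mathlib
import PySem

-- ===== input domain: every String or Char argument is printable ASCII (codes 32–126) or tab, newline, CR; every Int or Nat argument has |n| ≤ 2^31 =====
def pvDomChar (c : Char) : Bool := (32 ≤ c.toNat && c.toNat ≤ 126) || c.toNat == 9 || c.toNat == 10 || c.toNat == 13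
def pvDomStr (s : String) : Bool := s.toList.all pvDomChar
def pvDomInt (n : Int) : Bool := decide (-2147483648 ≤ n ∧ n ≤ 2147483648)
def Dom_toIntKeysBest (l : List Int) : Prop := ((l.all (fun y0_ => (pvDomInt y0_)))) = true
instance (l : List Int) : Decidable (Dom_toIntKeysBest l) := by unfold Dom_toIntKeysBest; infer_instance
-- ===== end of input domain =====

-- B replaces A's dedup-list + sort + lookup-dict with a sorted distinct list and a
-- hand-written binary search per element (alternative decomposition, similar cost).


-- ===== PORT A =====
-- seen = set(); ls = []; for e in l: if e not in seen: ls.append(e); seen.add(e)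
-- ls.sort(); index = {v: i for i, v in enumerate(ls)}; return [index[v] for v in l]
def toIntKeysBest (l : List Int) : List Int :=
  let st := l.foldl
      (fun (st : PySem.Set Int × List Int) e =>
        if PySem.Set.contains st.1 e then st
        else (PySem.Set.add st.1 e, st.2 ++ [e]))
      (([] : PySem.Set Int), ([] : List Int))
  let ls := PySem.List.sorted st.2 (fun x => x) false
  let index := (PySem.List.enumerate ls).foldl
      (fun (d : PySem.Dict Int Int) p => d.insert p.2 p.1) PySem.Dict.empty
  -- index[v]: the KeyError branch is unreachable (every v of l is a key of index),
  -- so getD's default is never used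
  l.map (fun v => index.getD v 0)

-- ===== PORT B =====
-- sl = sorted(set(l)); per element a hand-written bisect_left while-loop on sl.
-- PySem.List.bisectLeft is literally that loop (lo/hi halving, 'if sl[mid] < v').
def toIntKeysBest_alt (l : List Int) : List Int :=
  let sl := PySem.List.sorted (PySem.Set.ofList l) (fun x => x) false
  l.map (fun v => (PySem.List.bisectLeft sl v : Int))

-- ===== PRECONDITION & SPEC =====
def Spec_toIntKeysBest (l : List Int) (out : List Int) : Prop := out = toIntKeysBest_alt l
instance (l : List Int) (out : List Int) : Decidable (Spec_toIntKeysBest l out) := by unfold Spec_toIntKeysBest; infer_instance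

-- ===== CLAIM (what is proved, stated in full; the proofs are below) =====
def Claim_equal_toIntKeysBest : Prop := ∀ (l : List Int), Dom_toIntKeysBest l → Spec_toIntKeysBest l (toIntKeysBest l)

-- ===== LEMMAS AND PROOFS =====

-- A's loop keeps seen and ls equal (as lists), and both are the Python-set fold.
theorem toIntKeysBest_fold_eq (l : List Int) (s : PySem.Set Int) :
    l.foldl
      (fun (st : PySem.Set Int × List Int) e =>
        if PySem.Set.contains st.1 e then st
        else (PySem.Set.add st.1 e, st.2 ++ [e]))
      (s, (s : List Int))
    = (l.foldl PySem.Set.add s, l.foldl PySem.Set.add s) := by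
  induction l generalizing s with
  | nil => rfl
  | cons e t ih =>
      simp only [List.foldl_cons]
      by_cases h : e ∈ s
      · have : PySem.Set.add s e = s := by simp [PySem.Set.add, h]
        simpa [h, this] using ih s
      · have : PySem.Set.add s e = s ++ [e] := by simp [PySem.Set.add, h]
        simpa [h, this] using ih (s ++ [e])

-- the dict {v : i for i, v in enumerate(ls)} looks up the position of v in ls
theorem getD_enum_fold_of_notMem (ls : List Int) (s : Int) (d : PySem.Dict Int Int)
    (v : Int) (hv : v ∉ ls) :
    ((PySem.List.enumerate ls s).foldl
        (fun (d : PySem.Dict Int Int) p => d.insert p.2 p.1) d).getD v 0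
      = d.getD v 0 := by
  induction ls generalizing s d with
  | nil => rfl
  | cons x t ih =>
      simp only [PySem.List.enumerate_cons, List.foldl_cons]
      rw [ih _ _ (fun h => hv (List.mem_cons_of_mem _ h))]
      rw [PySem.Dict.getD_insert]
      rw [if_neg (by intro h; subst h; exact hv List.mem_cons_self)]

theorem getD_enum_fold (ls : List Int) (s : Int) (d : PySem.Dict Int Int)
    (v : Int) (hnd : ls.Nodup) (hv : v ∈ ls) :
    ((PySem.List.enumerate ls s).foldl
        (fun (d : PySem.Dict Int Int) p => d.insert p.2 p.1) d).getD v 0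
      = s + (ls.idxOf v : Int) := by
  induction ls generalizing s d with
  | nil => simp at hv
  | cons x t ih =>
      simp only [PySem.List.enumerate_cons, List.foldl_cons]
      by_cases hvx : v = x
      · subst hvx
        have hvn : v ∉ t := (List.nodup_cons.mp hnd).1
        rw [getD_enum_fold_of_notMem _ _ _ _ hvn, PySem.Dict.getD_insert]
        simp [List.idxOf_cons_self]
      · have hvt : v ∈ t := by
          rcases List.mem_cons.mp hv with h | h
          · exact absurd h hvx
          · exact h
        rw [ih _ _ (List.nodup_cons.mp hnd).2 hvt]
        rw [List.idxOf_cons_ne _ (fun h => hvx h.symm)]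
        push_cast
        ring

-- on a strictly increasing list, bisect_left of a member is its index
theorem bisectLeft_eq_idxOf (sl : List Int) (hlt : sl.Pairwise (· < ·))
    (v : Int) (hv : v ∈ sl) :
    PySem.List.bisectLeft sl v = sl.idxOf v := by
  have hle : sl.Pairwise (· ≤ ·) := hlt.imp (fun h => le_of_lt h)
  obtain ⟨hk, hlo, hhi⟩ := PySem.List.bisectLeft_spec sl v hle
  have hi : sl.idxOf v < sl.length := List.idxOf_lt_length_of_mem hv
  have hgv : sl[sl.idxOf v] = v := List.getElem_idxOf hi
  rcases lt_trichotomy (PySem.List.bisectLeft sl v) (sl.idxOf v) with h | h | h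
  · exfalso
    have h1 : v ≤ sl[PySem.List.bisectLeft sl v] :=
      hhi _ (lt_trans h hi) (le_refl _)
    have h2 : sl[PySem.List.bisectLeft sl v] < sl[sl.idxOf v] :=
      List.pairwise_iff_getElem.mp hlt _ _ (lt_trans h hi) hi h
    rw [hgv] at h2
    exact absurd (lt_of_le_of_lt h1 h2) (lt_irrefl v)
  · exact h
  · exfalso
    have h1 : sl[sl.idxOf v] < v := hlo _ hi h
    rw [hgv] at h1
    exact absurd h1 (lt_irrefl v)

-- ===== VERDICT (by name: the statement is the Claim_ definition above) =====
theorem toIntKeysBest_spec : Claim_equal_toIntKeysBest := by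
  intro l _
  show toIntKeysBest l = toIntKeysBest_alt l
  unfold toIntKeysBest toIntKeysBest_alt
  rw [toIntKeysBest_fold_eq l ([] : PySem.Set Int)]
  have hofl : (List.foldl PySem.Set.add ([] : PySem.Set Int) l) = PySem.Set.ofList l :=
    (PySem.Set.ofList_eq_foldl l).symm
  rw [hofl]
  apply List.map_congr_left
  intro v hvl
  have hperm := PySem.List.sorted_perm (PySem.Set.ofList l) (fun x => x) false
  have hlt := PySem.List.sorted_ofList_pairwise_lt (κ := Int) l
  have hnd : (PySem.List.sorted (PySem.Set.ofList l) (fun x => x) false).Nodup :=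
    hperm.nodup_iff.mpr (PySem.Set.nodup_ofList l)
  have hv : v ∈ PySem.List.sorted (PySem.Set.ofList l) (fun x => x) false :=
    hperm.mem_iff.mpr ((PySem.Set.mem_ofList l v).mpr hvl)
  rw [getD_enum_fold _ 0 _ v hnd hv, bisectLeft_eq_idxOf _ hlt v hv]
  simp
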